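-- pv_equiv track=rewrite | github.com/crazylogic03/Solutions | D_Yet_Another_Array_Problem.py | smallest_x
-- ===== SOURCE A (Python) =====
-- def gcd(a, b):
--     while b:
--         a, b = b, a % b
--     return a
--
-- def prime_factors(n):
--     factors = []
--     i = 2
--     while i * i <= n:
--         if n % i == 0:
--             factors.append(i)
--             while n % i == 0:
--                 n //= i
--         i += 1
--     if n > 1:
--         factors.append(n)
--     return factors
--
-- def smallest_x(arr):
--     g = arr[0]
--     for i in range(1, len(arr)):
--         g = gcd(g, arr[i])
--
--     if g == 1:
--         return 2
--
--     primes = prime_factors(g)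
--
--     x = 2
--     while x <= 10**18:
--         ok = True
--         for p in primes:
--             if x % p == 0:
--                 ok = False
--                 break
--         if ok:
--             return x
--         x += 1
--     return -1
-- ===== SOURCE B (Python) =====
-- def gcd(a, b):
--     while b:
--         a, b = b, a % b
--     return a
--
-- def smallest_x(arr):
--     g = arr[0]
--     for i in range(1, len(arr)):
--         g = gcd(g, arr[i])
--     if g < 2:
--         return 2
--     x = 2
--     while x <= 10**18:
--         if gcd(x, g) == 1:
--             return x
--         x += 1
--     return -1
-- ===== Notes on version B (the rewrite author's own statement) =====
-- stated objective: simpler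
-- what changed: B drops the trial-division prime_factors routine and the per-prime divisibility scan entirely: after the same sequential gcd fold it returns the first x>=2 coprime to g (gcd(x, g) == 1), guarding g < 2 exactly where A's factor list is empty.
import Mathlib
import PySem

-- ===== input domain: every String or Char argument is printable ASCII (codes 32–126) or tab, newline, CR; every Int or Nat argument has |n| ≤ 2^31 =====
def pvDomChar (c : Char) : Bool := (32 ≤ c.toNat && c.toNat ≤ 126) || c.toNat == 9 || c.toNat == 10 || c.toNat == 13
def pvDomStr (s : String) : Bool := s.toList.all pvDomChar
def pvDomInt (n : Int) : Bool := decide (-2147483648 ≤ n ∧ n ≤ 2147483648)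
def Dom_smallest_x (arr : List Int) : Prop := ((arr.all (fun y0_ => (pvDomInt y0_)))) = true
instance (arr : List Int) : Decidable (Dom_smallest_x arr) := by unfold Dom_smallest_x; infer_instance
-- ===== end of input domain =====

-- B replaces A's prime_factors + per-prime scan by a direct coprimality test gcd(x,g)==1 (simpler).
-- Both programs raise IndexError on arr = [] (arr[0]); Pre_ excludes exactly that input.

-- ===== PORT A =====

-- Python `%` on Int decreases |b| strictly when b ≠ 0 (termination of Euclid's loop below)
theorem pyMod_natAbs_lt (a b : Int) (hb : b ≠ 0) :
    (PySem.Int.mod a b).natAbs < b.natAbs := by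
  rcases lt_or_gt_of_ne hb with h | h
  · have := PySem.Int.mod_neg_bounds a h
    omega
  · have h1 := PySem.Int.mod_nonneg a h
    have h2 := PySem.Int.mod_lt a h
    omega

-- `def gcd(a,b): while b: a,b = b, a % b; return a` — the identical helper of both Pythons
def pyGcd (a b : Int) : Int :=
  if hb : b = 0 then a else pyGcd b (PySem.Int.mod a b)
termination_by b.natAbs
decreasing_by exact pyMod_natAbs_lt a b hb

-- inner `while n % i == 0: n //= i` of prime_factors, fueled
def stripA (i : Int) : Nat → Int → Int
  | 0, n => n
  | f + 1, n =>
      if PySem.Int.mod n i = 0 then stripA i f (PySem.Int.floordiv n i) else n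

-- outer `while i * i <= n` loop of prime_factors, fueled (fuel never exhausts: see pfLoop_spec)
def pfLoop : Nat → Int → Int → List Int → List Int
  | 0, _, n, factors => if n > 1 then factors ++ [n] else factors
  | f + 1, i, n, factors =>
      if i * i ≤ n then
        if PySem.Int.mod n i = 0 then
          pfLoop f (i + 1) (stripA i n.toNat n) (factors ++ [i])
        else pfLoop f (i + 1) n factors
      else if n > 1 then factors ++ [n] else factors

def prime_factors (n : Int) : List Int := pfLoop (n.toNat + 1) 2 n []

-- `ok = True; for p in primes: if x % p == 0: ok = False; break`
def okA (x : Int) : List Int → Bool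
  | [] => true
  | p :: ps => if PySem.Int.mod x p = 0 then false else okA x ps

-- `while x <= 10**18` search loop of A, fueled with 10^18 steps (enough: x starts at 2)
def searchA (primes : List Int) : Nat → Int → Int
  | 0, _ => -1
  | f + 1, x =>
      if x ≤ 10 ^ 18 then
        if okA x primes then x else searchA primes f (x + 1)
      else -1

def smallest_x (arr : List Int) : Int :=
  match arr with
  | [] => 0  -- arr[0] raises IndexError in Python; excluded by Pre_
  | a0 :: rest =>
    let g := rest.foldl pyGcd a0
    if g = 1 then 2
    else searchA (prime_factors g) (10 ^ 18) 2

-- ===== PORT B =====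

-- `while x <= 10**18` search loop of B: first x with gcd(x, g) == 1
def searchB (g : Int) : Nat → Int → Int
  | 0, _ => -1
  | f + 1, x =>
      if x ≤ 10 ^ 18 then
        if pyGcd x g = 1 then x else searchB g f (x + 1)
      else -1

def smallest_x_alt (arr : List Int) : Int :=
  match arr with
  | [] => 0  -- arr[0] raises IndexError in Python; excluded by Pre_
  | a0 :: rest =>
    let g := rest.foldl pyGcd a0
    if g < 2 then 2
    else searchB g (10 ^ 18) 2

-- ===== PRECONDITION & SPEC =====
-- Pre_ excludes only the empty list, on which both Pythons raise IndexError at arr[0].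
def Pre_smallest_x (arr : List Int) : Prop := arr ≠ []
instance (arr : List Int) : Decidable (Pre_smallest_x arr) := by unfold Pre_smallest_x; infer_instance

def pvWitness_smallest_x : List Int := ([4, 6])

def Spec_smallest_x (arr : List Int) (out : Int) : Prop := out = smallest_x_alt arr
instance (arr : List Int) (out : Int) : Decidable (Spec_smallest_x arr out) := by unfold Spec_smallest_x; infer_instance

-- ===== CLAIM (what is proved, stated in full; the proofs are below) =====
def Claim_equal_smallest_x : Prop := ∀ (arr : List Int), Dom_smallest_x arr → Pre_smallest_x arr → Spec_smallest_x arr (smallest_x arr)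

-- ===== LEMMAS AND PROOFS =====

theorem gcd_step (a b : Int) (ha : 0 ≤ a) (h : 0 < b) : Int.gcd a b = Int.gcd b (a % b) := by
  lift a to ℕ using ha
  lift b to ℕ using le_of_lt h
  rw [← Int.natCast_emod]
  simp only [Int.gcd_natCast_natCast]
  rw [Nat.gcd_comm, Nat.gcd_rec b a, Nat.gcd_comm]

theorem pyGcd_eq_gcd (a b : Int) (ha : 0 ≤ a) (hb : 0 ≤ b) :
    pyGcd a b = (Int.gcd a b : Int) := by
  induction a, b using pyGcd.induct with
  | case1 a =>
      rw [pyGcd]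
      simp [Int.natAbs_of_nonneg ha]
  | case2 a b h ih =>
      have hbpos : 0 < b := lt_of_le_of_ne hb (Ne.symm h)
      have hm : PySem.Int.mod a b = a % b := PySem.Int.mod_eq_emod_of_pos hbpos
      rw [pyGcd]
      simp only [h, dite_false]
      rw [hm] at ih ⊢
      rw [ih hb (Int.emod_nonneg a (ne_of_gt hbpos)), ← gcd_step a b ha hbpos]

theorem okA_eq_true_iff (x : Int) (ps : List Int) :
    okA x ps = true ↔ ∀ p ∈ ps, ¬ p ∣ x := by
  induction ps with
  | nil => simp [okA]
  | cons p ps ih =>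
      simp only [okA, List.mem_cons]
      by_cases h : PySem.Int.mod x p = 0
      · have : p ∣ x := (PySem.Int.mod_eq_zero_iff_dvd x p).mp h
        simp [h, this]
      · have : ¬ p ∣ x := fun hd => h ((PySem.Int.mod_eq_zero_iff_dvd x p).mpr hd)
        simp [h, ih, this]

theorem stripA_spec (i : Int) (hi : 2 ≤ i) :
    ∀ (f : Nat) (n : Int), 1 ≤ n → n.toNat ≤ f →
      stripA i f n ∣ n ∧ 1 ≤ stripA i f n ∧ ¬ i ∣ stripA i f n ∧
        ∃ k : Nat, n = i ^ k * stripA i f n := by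
  intro f
  induction f with
  | zero => intro n h1 h2; omega
  | succ f ih =>
      intro n h1 h2
      by_cases h : PySem.Int.mod n i = 0
      · have hdvd : i ∣ n := (PySem.Int.mod_eq_zero_iff_dvd n i).mp h
        have hipos : (0:Int) < i := by omega
        have hfd : PySem.Int.floordiv n i = n / i := PySem.Int.floordiv_eq_ediv_of_pos hipos
        obtain ⟨m, hm⟩ := hdvd
        have hq : n / i = m := by rw [hm]; exact Int.mul_ediv_cancel_left m (by omega)
        have hm1 : 1 ≤ m := by nlinarith
        have hmlt : m < n := by nlinarith
        have hrec := ih m hm1 (by omega)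
        obtain ⟨hd, hp, hni, k, hk⟩ := hrec
        simp only [stripA, h, if_true, hfd, hq]
        have hmn : m ∣ n := ⟨i, by rw [hm]; ring⟩
        set s := stripA i f m with hs
        refine ⟨hd.trans hmn, hp, hni, k + 1, ?_⟩
        rw [hm, hk]; ring
      · simp only [stripA, h, if_false]
        exact ⟨dvd_refl n, h1,
          fun hd => h ((PySem.Int.mod_eq_zero_iff_dvd n i).mpr hd), 0, by ring⟩

theorem pfExit (g i n : Int) (acc : List Int) (hi : 2 ≤ i) (h1 : 1 ≤ n) (hng : n ∣ g)
    (hacc1 : ∀ p ∈ acc, p ∣ g ∧ 2 ≤ p)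
    (hacc2 : ∀ q : Int, Prime q → 0 < q → q ∣ g → q ∈ acc ∨ q ∣ n)
    (hinv : ∀ d : Int, 2 ≤ d → d < i → ¬ d ∣ n) (hgt : n < i * i) :
    (∀ p ∈ (if n > 1 then acc ++ [n] else acc), p ∣ g ∧ 2 ≤ p) ∧
      (∀ q : Int, Prime q → 0 < q → q ∣ g → q ∈ (if n > 1 then acc ++ [n] else acc)) := by
  by_cases hn1 : n > 1
  · rw [if_pos hn1]
    constructor
    · intro p hp
      rcases List.mem_append.mp hp with h | h
      · exact hacc1 p h
      · have : p = n := by simpa using h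
        subst this
        exact ⟨hng, by omega⟩
    · intro q hq hq0 hqg
      rcases hacc2 q hq hq0 hqg with h | h
      · exact List.mem_append.mpr (Or.inl h)
      · have hq2 : 2 ≤ q := by have := hq.ne_one; omega
        obtain ⟨m, hm⟩ := h
        have hm1 : 1 ≤ m := by nlinarith
        by_cases hmeq : m = 1
        · subst hmeq
          have : q = n := by omega
          subst this
          exact List.mem_append.mpr (Or.inr (by simp))
        · exfalso
          have hm2 : 2 ≤ m := by omega
          have hsplit : q < i ∨ m < i := by
            by_contra hc
            push_neg at hc
            nlinarith [hc.1, hc.2]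
          rcases hsplit with hlt | hlt
          · exact hinv q hq2 hlt ⟨m, hm⟩
          · exact hinv m hm2 hlt ⟨q, by rw [hm]; ring⟩
  · have hn : n = 1 := by omega
    subst hn
    rw [if_neg hn1]
    refine ⟨hacc1, fun q hq hq0 hqg => ?_⟩
    rcases hacc2 q hq hq0 hqg with h | h
    · exact h
    · exact absurd (isUnit_of_dvd_one h) hq.not_unit

theorem pfLoop_spec (g : Int) :
    ∀ (f : Nat) (i n : Int) (acc : List Int),
      2 ≤ i → 1 ≤ n → n ∣ g → n + 2 ≤ (f : Int) + i →
      (∀ p ∈ acc, p ∣ g ∧ 2 ≤ p) →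
      (∀ q : Int, Prime q → 0 < q → q ∣ g → q ∈ acc ∨ q ∣ n) →
      (∀ d : Int, 2 ≤ d → d < i → ¬ d ∣ n) →
      (∀ p ∈ pfLoop f i n acc, p ∣ g ∧ 2 ≤ p) ∧
        (∀ q : Int, Prime q → 0 < q → q ∣ g → q ∈ pfLoop f i n acc) := by
  intro f
  induction f with
  | zero =>
      intro i n acc hi h1 hng hfuel hacc1 hacc2 hinv
      push_cast at hfuel
      have h2i : i * 2 ≤ i * i := mul_le_mul_of_nonneg_left hi (by omega)
      have hgt : n < i * i := by linarith
      simpa only [pfLoop] using pfExit g i n acc hi h1 hng hacc1 hacc2 hinv hgt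
  | succ f ih =>
      intro i n acc hi h1 hng hfuel hacc1 hacc2 hinv
      by_cases hcond : i * i ≤ n
      · by_cases hdvd : PySem.Int.mod n i = 0
        · have hid : i ∣ n := (PySem.Int.mod_eq_zero_iff_dvd n i).mp hdvd
          obtain ⟨hmd, hm1, hmi, k, hk⟩ := stripA_spec i hi n.toNat n h1 (le_refl _)
          set m := stripA i n.toNat n with hmdef
          have hmn : m ≤ n := Int.le_of_dvd (by omega) hmd
          simp only [pfLoop, if_pos hcond, if_pos hdvd, ← hmdef]
          apply ih (i + 1) m (acc ++ [i]) (by omega) hm1 (hmd.trans hng) (by push_cast; omega)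
          · intro p hp
            rcases List.mem_append.mp hp with h | h
            · exact hacc1 p h
            · have : p = i := by simpa using h
              subst this
              exact ⟨hid.trans hng, hi⟩
          · intro q hq hq0 hqg
            rcases hacc2 q hq hq0 hqg with h | h
            · exact Or.inl (List.mem_append.mpr (Or.inl h))
            · rw [hk] at h
              rcases hq.dvd_mul.mp h with h' | h'
              · have hqi : q ∣ i := hq.dvd_of_dvd_pow h'
                have hqle : q ≤ i := Int.le_of_dvd (by omega) hqi
                have hq2 : 2 ≤ q := by have := hq.ne_one; omega
                rcases eq_or_lt_of_le hqle with heq | hlt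
                · exact Or.inl (List.mem_append.mpr (Or.inr (by simp [heq])))
                · exact absurd (hqi.trans hid) (hinv q hq2 hlt)
              · exact Or.inr h'
          · intro d hd2 hdlt hddvd
            rcases eq_or_lt_of_le (by omega : d + 1 ≤ i + 1) with heq | hlt
            · have : d = i := by omega
              subst this
              exact hmi hddvd
            · exact hinv d hd2 (by omega) (hddvd.trans hmd)
        · simp only [pfLoop, if_pos hcond, if_neg hdvd]
          apply ih (i + 1) n acc (by omega) h1 hng (by push_cast; omega) hacc1 hacc2
          intro d hd2 hdlt hddvd
          rcases eq_or_lt_of_le (by omega : d + 1 ≤ i + 1) with heq | hlt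
          · have : d = i := by omega
            subst this
            exact hdvd ((PySem.Int.mod_eq_zero_iff_dvd n d).mpr hddvd)
          · exact hinv d hd2 (by omega) hddvd
      · simp only [pfLoop, if_neg hcond]
        exact pfExit g i n acc hi h1 hng hacc1 hacc2 hinv (by omega)

theorem prime_factors_spec (g : Int) (hg : 2 ≤ g) :
    (∀ p ∈ prime_factors g, p ∣ g ∧ 2 ≤ p) ∧
      (∀ q : Int, Prime q → 0 < q → q ∣ g → q ∈ prime_factors g) := by
  refine pfLoop_spec g (g.toNat + 1) 2 g [] (by omega) (by omega) dvd_rfl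
    (by push_cast; omega) (by simp) (fun q _ _ h => Or.inr h) (by omega)

theorem okA_iff_gcd_one (g x : Int) (hg : 2 ≤ g) (hx : 0 ≤ x) :
    okA x (prime_factors g) = true ↔ Int.gcd x g = 1 := by
  obtain ⟨pf1, pf2⟩ := prime_factors_spec g hg
  rw [okA_eq_true_iff]
  constructor
  · intro h
    by_contra hne
    obtain ⟨q', hq', hdvd⟩ := Nat.exists_prime_and_dvd hne
    have hq : Prime ((q' : Int)) := Nat.prime_iff_prime_int.mp hq'
    have hq0 : (0:Int) < (q' : Int) := by exact_mod_cast hq'.pos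
    have hd : ((Int.gcd x g : Nat) : Int) ∣ g := Int.gcd_dvd_right x g
    have hdg : (q' : Int) ∣ g := dvd_trans (Int.natCast_dvd_natCast.mpr hdvd) hd
    have hdx : (q' : Int) ∣ x := dvd_trans (Int.natCast_dvd_natCast.mpr hdvd) (Int.gcd_dvd_left x g)
    exact h _ (pf2 _ hq hq0 hdg) hdx
  · intro h1 p hp hpx
    obtain ⟨hpg, hp2⟩ := pf1 p hp
    have hd := Int.dvd_coe_gcd hpx hpg
    rw [h1] at hd
    have := Int.le_of_dvd one_pos hd
    omega

theorem search_eq (g : Int) (hg : 2 ≤ g) :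
    ∀ (f : Nat) (x : Int), 0 ≤ x →
      searchA (prime_factors g) f x = searchB g f x := by
  intro f
  induction f with
  | zero => intro x _; rfl
  | succ f ih =>
      intro x hx
      simp only [searchA, searchB]
      by_cases hle : x ≤ 10 ^ 18
      · rw [if_pos hle, if_pos hle]
        have hgcd : pyGcd x g = (Int.gcd x g : Int) := pyGcd_eq_gcd x g hx (by omega)
        by_cases hok : Int.gcd x g = 1
        · rw [if_pos ((okA_iff_gcd_one g x hg hx).mpr hok),
            if_pos (by rw [hgcd, hok]; norm_num)]
        · have ho : ¬ okA x (prime_factors g) = true :=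
            fun hc => hok ((okA_iff_gcd_one g x hg hx).mp hc)
          have hpg : ¬ pyGcd x g = 1 := by
            rw [hgcd]
            exact_mod_cast hok
          rw [if_neg ho, if_neg hpg]
          exact ih (x + 1) (by omega)
      · rw [if_neg hle, if_neg hle]

theorem tail_eq (g : Int) :
    (if g = 1 then (2 : Int) else searchA (prime_factors g) (10 ^ 18) 2) =
      (if g < 2 then (2 : Int) else searchB g (10 ^ 18) 2) := by
  by_cases h1 : g = 1
  · subst h1
    norm_num
  · rw [if_neg h1]
    by_cases h2 : g < 2
    · rw [if_pos h2]
      have hpf : prime_factors g = [] := by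
        have ht : g.toNat = 0 := by omega
        simp only [prime_factors, ht]
        simp only [pfLoop]
        rw [if_neg (by omega : ¬ (2 * 2 ≤ g)), if_neg (by omega : ¬ g > 1)]
      rw [hpf]
      have h18 : (10:Nat) ^ 18 = (10 ^ 18 - 1) + 1 := by norm_num
      rw [h18, searchA]
      rw [if_pos (by norm_num : (2:Int) ≤ 10 ^ 18),
        if_pos (show okA 2 [] = true from rfl)]
    · rw [if_neg h2]
      exact search_eq g (by omega) _ 2 (by omega)

-- ===== VERDICT (by name: the statement is the Claim_ definition above) =====
theorem smallest_x_spec : Claim_equal_smallest_x := by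
  intro arr _ hpre
  unfold Spec_smallest_x
  match arr with
  | [] => exact absurd rfl hpre
  | a0 :: rest =>
      simp only [smallest_x, smallest_x_alt]
      exact tail_eq (rest.foldl pyGcd a0)
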